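-- pv_equiv track=rewrite | github.com/gabrielemongirdaite/advent_of_code_2020 | day16.py | assign_categories
-- ===== SOURCE A (Python) =====
-- def assign_categories(category, features, cat):
--     choices = {}
--     k = 0
--     for i in category:
--         choices[cat[k]] = []
--         for j in features:
--             if set(i).issubset(set(features[j])):
--                 choices[cat[k]].append(j)
--         k += 1
--     return choices
-- ===== SOURCE B (Python) =====
-- def assign_categories(category, features, cat):
--     # Inverted index: element -> set of feature keys whose value list contains it.
--     index = {}
--     for j, vals in features.items():
--         for x in vals:
--             index.setdefault(x, set()).add(j)
--     all_keys = list(features)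
--     choices = {}
--     for key, i in zip(cat, category):
--         valid = set(all_keys)
--         for x in i:
--             valid &= index.get(x, set())
--         choices[key] = [j for j in all_keys if j in valid]
--     return choices
-- ===== Notes on version B (the rewrite author's own statement) =====
-- stated objective: faster
-- what changed: Replaces the per-category subset test against every feature's value set with an inverted index (element -> set of feature keys) built once, then intersects index entries over each category item and filters the feature keys to preserve order.
import Mathlib
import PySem

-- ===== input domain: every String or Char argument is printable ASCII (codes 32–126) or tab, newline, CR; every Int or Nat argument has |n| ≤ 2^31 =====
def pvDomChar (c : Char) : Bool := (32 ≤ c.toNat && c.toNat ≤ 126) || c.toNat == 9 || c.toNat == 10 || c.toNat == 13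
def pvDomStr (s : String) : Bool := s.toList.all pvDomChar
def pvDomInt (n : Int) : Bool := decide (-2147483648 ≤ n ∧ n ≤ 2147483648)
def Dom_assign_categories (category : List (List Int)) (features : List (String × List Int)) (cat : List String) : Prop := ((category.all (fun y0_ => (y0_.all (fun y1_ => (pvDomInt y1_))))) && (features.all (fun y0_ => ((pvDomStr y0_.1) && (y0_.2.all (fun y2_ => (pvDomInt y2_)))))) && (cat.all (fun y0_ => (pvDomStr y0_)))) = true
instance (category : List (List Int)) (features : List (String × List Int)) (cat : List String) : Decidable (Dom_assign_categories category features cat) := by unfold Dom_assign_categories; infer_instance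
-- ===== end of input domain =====

-- B replaces the per-category subset tests with an inverted index (element -> set of feature keys)
-- built once, intersecting index entries per category item; measured faster in a timing run.


-- ===== PORT A =====
-- `features` is a Python dict: `for j in features` iterates its keys, `features[j]` is the lookup.
def assign_categories (category : List (List Int)) (features : List (String × List Int)) (cat : List String) : List (String × List String) :=
  let fd := PySem.Dict.ofList features
  (category.foldl
    (fun (st : PySem.Dict String (List String) × Nat) i =>
      let key := cat.getD st.2 ""   -- cat[k]; Pre_ guarantees k < cat.length (else Python raises IndexError)
      let d0 := st.1.insert key []
      let d1 := fd.keys.foldl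
        (fun d j =>
          if PySem.Set.issubset (PySem.Set.ofList i) (PySem.Set.ofList ((fd.get? j).getD []))
          then d.modify key [] (fun l => l ++ [j]) else d) d0
      (d1, st.2 + 1))
    (PySem.Dict.empty, 0)).1.items

-- ===== PORT B =====
def assign_categories_alt (category : List (List Int)) (features : List (String × List Int)) (cat : List String) : List (String × List String) :=
  let fd := PySem.Dict.ofList features
  let index : PySem.Dict Int (PySem.Set String) :=
    fd.items.foldl
      (fun idx jv =>
        jv.2.foldl (fun idx x => idx.modify x PySem.Set.empty (fun s => s.add jv.1)) idx)
      PySem.Dict.empty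
  let allKeys := fd.keys
  ((cat.zip category).foldl
    (fun (ch : PySem.Dict String (List String)) p =>
      let valid := p.2.foldl
        (fun v x => PySem.Set.inter v (index.getD x PySem.Set.empty))
        (PySem.Set.ofList allKeys)
      ch.insert p.1 (allKeys.filter (fun j => PySem.Set.contains valid j)))
    PySem.Dict.empty).items

-- ===== PRECONDITION & SPEC =====
-- Pre_ excludes exactly the inputs where A raises IndexError on cat[k]: category longer than cat.
def Pre_assign_categories (category : List (List Int)) (features : List (String × List Int)) (cat : List String) : Prop := category.length ≤ cat.length
instance (category : List (List Int)) (features : List (String × List Int)) (cat : List String) : Decidable (Pre_assign_categories category features cat) := by unfold Pre_assign_categories; infer_instance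
def pvWitness_assign_categories : List (List Int) × (List (String × List Int)) × List String := ([[1], []], [("a", [1, 2]), ("b", [2])], ["x", "y"])

def Spec_assign_categories (category : List (List Int)) (features : List (String × List Int)) (cat : List String) (out : List (String × List String)) : Prop := out = assign_categories_alt category features cat
instance (category : List (List Int)) (features : List (String × List Int)) (cat : List String) (out : List (String × List String)) : Decidable (Spec_assign_categories category features cat out) := by unfold Spec_assign_categories; infer_instance

-- ===== CLAIM (what is proved, stated in full; the proofs are below) =====
def Claim_equal_assign_categories : Prop := ∀ (category : List (List Int)) (features : List (String × List Int)) (cat : List String), Dom_assign_categories category features cat → Pre_assign_categories category features cat → Spec_assign_categories category features cat (assign_categories category features cat)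

-- ===== LEMMAS AND PROOFS =====

-- A's inner loop over feature keys, appending matches to choices[key], is one insert of the filtered list.
lemma foldA_modify_filter (L : List String) (p : String → Bool) (key : String)
    (d : PySem.Dict String (List String)) (l0 : List String) :
    L.foldl (fun d j => if p j then d.modify key [] (fun l => l ++ [j]) else d) (d.insert key l0)
      = d.insert key (l0 ++ L.filter p) := by
  induction L generalizing l0 with
  | nil => simp
  | cons j L ih =>
    cases hp : p j with
    | false => simp [List.foldl_cons, hp, ih]
    | true =>
      rw [List.foldl_cons]
      simp only [hp, if_true]
      rw [show PySem.Dict.modify (d.insert key l0) key [] (fun l => l ++ [j]) = d.insert key (l0 ++ [j]) from by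
            simp [PySem.Dict.modify, PySem.Dict.getD_insert_self, PySem.Dict.insert_insert_self],
          ih, List.filter_cons]
      simp [hp]

-- membership in the inverted index after processing one feature's value list
lemma idx_inner_mem (vals : List Int) (j0 : String) (idx : PySem.Dict Int (PySem.Set String))
    (x : Int) (j : String) :
    j ∈ (vals.foldl (fun idx x' => idx.modify x' PySem.Set.empty (fun s => s.add j0)) idx).getD x PySem.Set.empty
      ↔ j ∈ idx.getD x PySem.Set.empty ∨ (x ∈ vals ∧ j = j0) := by
  induction vals generalizing idx with
  | nil => simp
  | cons y vals ih =>
    simp only [List.foldl_cons, ih, PySem.Dict.getD_modify]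
    by_cases hxy : x = y
    · subst hxy
      simp [PySem.Set.mem_add]
      tauto
    · simp only [if_neg hxy, List.mem_cons]
      tauto

-- membership in the full inverted index
lemma idx_outer_mem (items : List (String × List Int)) (idx : PySem.Dict Int (PySem.Set String))
    (x : Int) (j : String) :
    j ∈ (items.foldl
          (fun idx jv => jv.2.foldl (fun idx x' => idx.modify x' PySem.Set.empty (fun s => s.add jv.1)) idx)
          idx).getD x PySem.Set.empty
      ↔ j ∈ idx.getD x PySem.Set.empty ∨ ∃ jv ∈ items, jv.1 = j ∧ x ∈ jv.2 := by
  induction items generalizing idx with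
  | nil => simp
  | cons jv items ih =>
    simp only [List.foldl_cons, ih, idx_inner_mem, List.exists_mem_cons_iff]
    constructor
    · rintro ((h | ⟨hx, rfl⟩) | h)
      · exact Or.inl h
      · exact Or.inr (Or.inl ⟨rfl, hx⟩)
      · exact Or.inr (Or.inr h)
    · rintro (h | ⟨h1, h2⟩ | h)
      · exact Or.inl (Or.inl h)
      · exact Or.inl (Or.inr ⟨h2, h1.symm⟩)
      · exact Or.inr h

-- membership in the running intersection
lemma valid_mem (i : List Int) (v0 : PySem.Set String) (idx : Int → PySem.Set String) (j : String) :
    j ∈ i.foldl (fun v x => PySem.Set.inter v (idx x)) v0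
      ↔ j ∈ v0 ∧ ∀ x ∈ i, j ∈ idx x := by
  induction i generalizing v0 with
  | nil => simp
  | cons x i ih =>
    simp only [List.foldl_cons, ih, PySem.Set.mem_inter, List.mem_cons]
    constructor
    · rintro ⟨⟨h0, hx⟩, h⟩
      exact ⟨h0, by rintro y (rfl | hy); exact hx; exact h y hy⟩
    · rintro ⟨h0, h⟩
      exact ⟨⟨h0, h x (Or.inl rfl)⟩, fun y hy => h y (Or.inr hy)⟩

-- for a key j of a nodup-keyed dict, index membership is membership in that key's value list
lemma idx_lookup (fd : PySem.Dict String (List Int)) (hnd : fd.keys.Nodup)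
    (j : String) (hj : j ∈ fd.keys) (x : Int) :
    (∃ jv ∈ fd.items, jv.1 = j ∧ x ∈ jv.2) ↔ x ∈ (fd.get? j).getD [] := by
  constructor
  · rintro ⟨⟨k, v⟩, hmem, rfl, hx⟩
    rw [PySem.Dict.get?_of_mem_items fd hmem hnd]
    exact hx
  · intro hx
    rcases h : fd.get? j with _ | v
    · rw [h] at hx; simp at hx
    · rw [h] at hx
      exact ⟨(j, v), PySem.Dict.mem_items_of_get?_eq_some fd h, rfl, hx⟩

-- the generic shape of both top-level loops, once each body is a single insert
lemma top_fold (g : List Int → List String) (category : List (List Int)) (cat : List String)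
    (n : Nat) (d : PySem.Dict String (List String)) (h : n + category.length ≤ cat.length) :
    (category.foldl (fun (st : PySem.Dict String (List String) × Nat) i =>
        (st.1.insert (cat.getD st.2 "") (g i), st.2 + 1)) (d, n)).1
      = ((cat.drop n).zip category).foldl (fun ch p => ch.insert p.1 (g p.2)) d := by
  induction category generalizing n d with
  | nil => simp
  | cons i rest ih =>
    have hn : n < cat.length := by simp at h; omega
    rw [List.drop_eq_getElem_cons hn]
    simp only [List.zip_cons_cons, List.foldl_cons]
    rw [List.getD_eq_getElem cat "" hn]
    exact ih (n + 1) _ (by simp at h ⊢; omega)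

-- the two per-item filter predicates agree on feature keys
lemma pred_eq (features : List (String × List Int)) (i : List Int) (j : String)
    (hj : j ∈ (PySem.Dict.ofList features).keys) :
    PySem.Set.contains
        (i.foldl
          (fun v x => PySem.Set.inter v
            ((((PySem.Dict.ofList features).items.foldl
                (fun idx jv => jv.2.foldl (fun idx x' => idx.modify x' PySem.Set.empty (fun s => s.add jv.1)) idx)
                PySem.Dict.empty)).getD x PySem.Set.empty))
          (PySem.Set.ofList (PySem.Dict.ofList features).keys)) j
      = PySem.Set.issubset (PySem.Set.ofList i)
          (PySem.Set.ofList (((PySem.Dict.ofList features).get? j).getD [])) := by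
  rw [Bool.eq_iff_iff]
  simp only [PySem.Set.contains, PySem.Set.issubset, List.contains_iff_mem, List.all_eq_true]
  rw [valid_mem]
  constructor
  · rintro ⟨-, hall⟩ x hx
    rw [PySem.Set.mem_ofList] at hx ⊢
    have := hall x hx
    rw [idx_outer_mem] at this
    rcases this with h | h
    · simp at h
    · exact (idx_lookup _ (PySem.Dict.nodup_keys_ofList features) j hj x).mp h
  · intro hall
    refine ⟨(PySem.Set.mem_ofList _ _).mpr hj, fun x hx => ?_⟩
    rw [idx_outer_mem]
    refine Or.inr ?_
    have := hall x ((PySem.Set.mem_ofList _ _).mpr hx)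
    rw [PySem.Set.mem_ofList] at this
    exact (idx_lookup _ (PySem.Dict.nodup_keys_ofList features) j hj x).mpr this

-- ===== VERDICT (by name: the statement is the Claim_ definition above) =====
theorem assign_categories_spec : Claim_equal_assign_categories := by
  intro category features cat _ hpre
  unfold Pre_assign_categories at hpre
  unfold Spec_assign_categories assign_categories assign_categories_alt
  simp only []
  congr 1
  have hbody : (fun (st : PySem.Dict String (List String) × Nat) i =>
      let key := cat.getD st.2 ""
      let d0 := st.1.insert key []
      let d1 := (PySem.Dict.ofList features).keys.foldl
        (fun d j =>
          if PySem.Set.issubset (PySem.Set.ofList i)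
              (PySem.Set.ofList (((PySem.Dict.ofList features).get? j).getD []))
          then d.modify key [] (fun l => l ++ [j]) else d) d0
      (d1, st.2 + 1))
      = (fun (st : PySem.Dict String (List String) × Nat) i =>
          (st.1.insert (cat.getD st.2 "")
            ((PySem.Dict.ofList features).keys.filter
              (fun j => PySem.Set.issubset (PySem.Set.ofList i)
                (PySem.Set.ofList (((PySem.Dict.ofList features).get? j).getD [])))), st.2 + 1)) := by
    funext st i
    simp only []
    rw [foldA_modify_filter]
    simp
  rw [hbody, top_fold _ category cat 0 _ (by omega)]
  simp only [List.drop_zero]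
  refine PySem.List.foldl_congr_mem _ _ _ _ (fun ch p _ => ?_)
  congr 1
  exact List.filter_congr (fun j hj => (pred_eq features p.2 j hj).symm)
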